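-- pv_equiv track=rewrite | github.com/tlagore/simplex_calculator | simplex/simplex_dictionary.py | __filter_largest_increase
-- ===== SOURCE A (Python) =====
-- def __filter_largest_increase(candidate_basis):
--     largest_increase = -1
--     largest = []
--     for (entering_var, basis, increase) in candidate_basis:
--         if increase > largest_increase:
--             largest = [(entering_var, basis)]
--             largest_increase = increase
--         elif increase == largest_increase:
--             largest.append((entering_var, basis))
--
--     return largest
-- ===== SOURCE B (Python) =====
-- def __filter_largest_increase(candidate_basis):
--     m = -1
--     for (_entering_var, _basis, increase) in candidate_basis:
--         if increase > m:
--             m = increase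
--     return [(entering_var, basis)
--             for (entering_var, basis, increase) in candidate_basis
--             if increase == m]
-- ===== Notes on version B (the rewrite author's own statement) =====
-- stated objective: simpler
-- what changed: Replaced A's single interleaved loop that maintains both the running maximum and the collected list (resetting the list on each new maximum) with two plain passes: one pass computing the maximum increase (with the same -1 start) and a comprehension filtering the tuples whose increase equals it.
import Mathlib
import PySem

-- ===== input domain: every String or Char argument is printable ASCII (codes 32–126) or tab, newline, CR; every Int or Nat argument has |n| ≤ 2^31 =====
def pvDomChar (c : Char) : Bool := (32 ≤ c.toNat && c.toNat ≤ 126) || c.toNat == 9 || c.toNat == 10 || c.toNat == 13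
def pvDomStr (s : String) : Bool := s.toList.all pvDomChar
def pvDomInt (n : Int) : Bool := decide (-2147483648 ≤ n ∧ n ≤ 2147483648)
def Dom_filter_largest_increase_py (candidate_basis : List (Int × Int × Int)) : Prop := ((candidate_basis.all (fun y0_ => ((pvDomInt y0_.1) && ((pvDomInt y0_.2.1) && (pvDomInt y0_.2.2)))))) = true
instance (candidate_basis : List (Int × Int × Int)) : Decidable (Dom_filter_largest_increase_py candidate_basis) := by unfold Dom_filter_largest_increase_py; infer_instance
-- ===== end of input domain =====

-- B replaces A's single interleaved running-max-and-collect loop with a max pass followed by a filter pass (alternative decomposition, same cost).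


-- ===== PORT A =====
-- one foldl over the state (largest_increase, largest), exactly A's loop
def filter_largest_increase_py (candidate_basis : List (Int × Int × Int)) : List (Int × Int) :=
  (candidate_basis.foldl
    (fun (s : Int × List (Int × Int)) t =>
      if t.2.2 > s.1 then (t.2.2, [(t.1, t.2.1)])
      else if t.2.2 = s.1 then (s.1, s.2 ++ [(t.1, t.2.1)])
      else s)
    (-1, [])).2

-- ===== PORT B =====
-- first pass: maximum increase starting from -1; second pass: filter by that maximum
def filter_largest_increase_py_alt (candidate_basis : List (Int × Int × Int)) : List (Int × Int) :=
  let m := candidate_basis.foldl (fun m t => if t.2.2 > m then t.2.2 else m) (-1)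
  (candidate_basis.filter (fun t => t.2.2 = m)).map (fun t => (t.1, t.2.1))

-- ===== PRECONDITION & SPEC =====
def Spec_filter_largest_increase_py (candidate_basis : List (Int × Int × Int)) (out : List (Int × Int)) : Prop := out = filter_largest_increase_py_alt candidate_basis
instance (candidate_basis : List (Int × Int × Int)) (out : List (Int × Int)) : Decidable (Spec_filter_largest_increase_py candidate_basis out) := by unfold Spec_filter_largest_increase_py; infer_instance

-- ===== CLAIM (what is proved, stated in full; the proofs are below) =====
def Claim_equal_filter_largest_increase_py : Prop := ∀ (candidate_basis : List (Int × Int × Int)), Dom_filter_largest_increase_py candidate_basis → Spec_filter_largest_increase_py candidate_basis (filter_largest_increase_py candidate_basis)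

-- ===== LEMMAS AND PROOFS =====

def pvFoldMax (l : List (Int × Int × Int)) (m : Int) : Int :=
  l.foldl (fun m t => if t.2.2 > m then t.2.2 else m) m

lemma pvFoldMax_ge (l : List (Int × Int × Int)) (m : Int) : m ≤ pvFoldMax l m := by
  induction l generalizing m with
  | nil => simp [pvFoldMax]
  | cons a l ih =>
    simp only [pvFoldMax, List.foldl_cons]
    split
    · exact le_trans (le_of_lt (by assumption)) (ih _)
    · exact ih m

-- characterisation of A's loop: resulting list is (old list if the max was never beaten) ++ all tuples achieving the max
lemma loopChar (l : List (Int × Int × Int)) (li : Int) (lg : List (Int × Int)) :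
    l.foldl
      (fun (s : Int × List (Int × Int)) t =>
        if t.2.2 > s.1 then (t.2.2, [(t.1, t.2.1)])
        else if t.2.2 = s.1 then (s.1, s.2 ++ [(t.1, t.2.1)])
        else s) (li, lg)
    = (pvFoldMax l li,
       (if pvFoldMax l li = li then lg else []) ++
         (l.filter (fun t => t.2.2 = pvFoldMax l li)).map (fun t => (t.1, t.2.1))) := by
  induction l generalizing li lg with
  | nil => simp [pvFoldMax]
  | cons a l ih =>
    simp only [List.foldl_cons]
    by_cases h1 : a.2.2 > li
    · have hM : pvFoldMax (a :: l) li = pvFoldMax l a.2.2 := by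
        simp [pvFoldMax, List.foldl_cons, h1]
      have hge := pvFoldMax_ge l a.2.2
      have hne : ¬ pvFoldMax l a.2.2 = li := by omega
      rw [if_pos h1, ih, hM, if_neg hne, List.filter_cons]
      by_cases h2 : a.2.2 = pvFoldMax l a.2.2
      · simp [h2.symm]
      · have : ¬ pvFoldMax l a.2.2 = a.2.2 := fun h => h2 h.symm
        simp [h2, this]
    · rw [if_neg h1]
      have hM : pvFoldMax (a :: l) li = pvFoldMax l li := by
        simp [pvFoldMax, List.foldl_cons, h1]
      have hge := pvFoldMax_ge l li
      by_cases h2 : a.2.2 = li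
      · rw [if_pos h2, ih, hM, List.filter_cons]
        by_cases h3 : pvFoldMax l li = li
        · simp [h3, h2]
        · have : ¬ a.2.2 = pvFoldMax l li := by omega
          simp [h3, this]
      · rw [if_neg h2, ih, hM, List.filter_cons]
        have : ¬ a.2.2 = pvFoldMax l li := by omega
        simp [this]
-- ===== VERDICT (by name: the statement is the Claim_ definition above) =====
theorem filter_largest_increase_py_spec : Claim_equal_filter_largest_increase_py := by
  intro cb _
  unfold Spec_filter_largest_increase_py filter_largest_increase_py filter_largest_increase_py_alt
  rw [loopChar]
  simp [pvFoldMax]
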